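-- pv_equiv track=rewrite | github.com/fede0429/freqtrade-config | scripts/ops/build_validation_dashboard.py | recent_real_errors
-- ===== SOURCE A (Python) =====
-- def recent_real_errors(lines: list[str]) -> list[str]:
--     results: list[str] = []
--     for line in lines:
--         lower = line.lower()
--         if "traceback" in lower or "exception:" in lower or " - critical - " in lower:
--             results.append(line)
--             continue
--         if " - error - " in lower and "task was destroyed but it is pending" not in lower:
--             results.append(line)
--     return results[-6:]
-- ===== SOURCE B (Python) =====
-- def recent_real_errors(lines: list[str]) -> list[str]:
--     buf: list[str] = []
--     for line in reversed(lines):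
--         lower = line.lower()
--         if ("traceback" in lower or "exception:" in lower or " - critical - " in lower) or (
--             " - error - " in lower and "task was destroyed but it is pending" not in lower
--         ):
--             buf.append(line)
--             if len(buf) == 6:
--                 break
--     buf.reverse()
--     return buf
-- ===== Notes on version B (the rewrite author's own statement) =====
-- stated objective: alternative
-- what changed: B scans the lines in reverse with a bounded 6-element buffer and breaks early, then reverses the buffer, instead of A's full forward filter followed by a [-6:] slice.
import Mathlib
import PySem

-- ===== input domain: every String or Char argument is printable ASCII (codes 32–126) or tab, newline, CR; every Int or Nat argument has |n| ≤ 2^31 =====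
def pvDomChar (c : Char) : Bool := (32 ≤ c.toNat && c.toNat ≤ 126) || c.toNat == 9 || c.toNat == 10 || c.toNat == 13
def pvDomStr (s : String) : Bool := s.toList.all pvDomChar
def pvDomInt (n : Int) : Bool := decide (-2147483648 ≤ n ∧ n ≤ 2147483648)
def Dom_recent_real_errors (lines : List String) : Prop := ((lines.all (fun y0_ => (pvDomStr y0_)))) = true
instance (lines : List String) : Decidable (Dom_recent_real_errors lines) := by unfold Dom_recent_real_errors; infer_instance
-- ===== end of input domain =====

-- B iterates in reverse with a bounded 6-element buffer and early break instead of A's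
-- full forward filter plus a [-6:] slice; objective: alternative decomposition (same cost class).

-- ===== PORT A =====
def recent_real_errors (lines : List String) : List String :=
  let results := lines.foldl
    (fun results line =>
      let lower := PySem.Str.lower line
      if PySem.Str.isIn "traceback" lower || PySem.Str.isIn "exception:" lower ||
          PySem.Str.isIn " - critical - " lower then
        results ++ [line]
      else if PySem.Str.isIn " - error - " lower &&
          !PySem.Str.isIn "task was destroyed but it is pending" lower then
        results ++ [line]
      else
        results) []
  PySem.List.slice results (some (-6)) none

-- ===== PORT B =====
def errLineB (line : String) : Bool :=
  let lower := PySem.Str.lower line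
  (PySem.Str.isIn "traceback" lower || PySem.Str.isIn "exception:" lower ||
      PySem.Str.isIn " - critical - " lower) ||
    (PySem.Str.isIn " - error - " lower &&
      !PySem.Str.isIn "task was destroyed but it is pending" lower)

def altGoB : List String → List String → List String
  | [], buf => buf
  | line :: rest, buf =>
      if errLineB line then
        let buf' := buf ++ [line]
        if buf'.length = 6 then buf' else altGoB rest buf'
      else altGoB rest buf

def recent_real_errors_alt (lines : List String) : List String :=
  (altGoB lines.reverse []).reverse

-- ===== PRECONDITION & SPEC =====
def Spec_recent_real_errors (lines : List String) (out : List String) : Prop := out = recent_real_errors_alt lines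
instance (lines : List String) (out : List String) : Decidable (Spec_recent_real_errors lines out) := by unfold Spec_recent_real_errors; infer_instance

-- ===== CLAIM (what is proved, stated in full; the proofs are below) =====
def Claim_equal_recent_real_errors : Prop := ∀ (lines : List String), Dom_recent_real_errors lines → Spec_recent_real_errors lines (recent_real_errors lines)

-- ===== LEMMAS AND PROOFS =====

-- A's two appending branches are one append guarded by B's combined predicate.
lemma stepA_eq :
    (fun (results : List String) (line : String) =>
      let lower := PySem.Str.lower line
      if PySem.Str.isIn "traceback" lower || PySem.Str.isIn "exception:" lower ||
          PySem.Str.isIn " - critical - " lower then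
        results ++ [line]
      else if PySem.Str.isIn " - error - " lower &&
          !PySem.Str.isIn "task was destroyed but it is pending" lower then
        results ++ [line]
      else
        results)
    = (fun (results : List String) (line : String) =>
        if errLineB line then results ++ [id line] else results) := by
  funext results line
  simp only [errLineB, id]
  split_ifs with h1 h2 h3 h4 h5 <;> simp_all

-- A's loop is the filter by B's predicate.
lemma a_loop_eq (lines : List String) :
    lines.foldl
      (fun results line =>
        let lower := PySem.Str.lower line
        if PySem.Str.isIn "traceback" lower || PySem.Str.isIn "exception:" lower ||
            PySem.Str.isIn " - critical - " lower then
          results ++ [line]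
        else if PySem.Str.isIn " - error - " lower &&
            !PySem.Str.isIn "task was destroyed but it is pending" lower then
          results ++ [line]
        else
          results) []
    = lines.filter errLineB := by
  rw [stepA_eq, PySem.List.foldl_append_if errLineB id lines []]
  simp

-- B's bounded-buffer loop collects the first (6 - |buf|) matches.
lemma altGoB_eq (l : List String) :
    ∀ buf : List String, buf.length < 6 →
      altGoB l buf = buf ++ (l.filter errLineB).take (6 - buf.length) := by
  induction l with
  | nil => intro buf _; simp [altGoB]
  | cons line rest ih =>
      intro buf hbuf
      by_cases h : errLineB line
      · simp only [altGoB, h, if_true, List.filter_cons, List.length_append,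
          List.length_singleton]
        by_cases h6 : buf.length + 1 = 6
        · have : 6 - buf.length = 1 := by omega
          simp [h6, this]
        · rw [if_neg h6, ih (buf ++ [line]) (by simp; omega)]
          have : 6 - buf.length = (6 - (buf ++ [line]).length) + 1 := by simp; omega
          simp [this]
      · simp [altGoB, h, ih buf hbuf]

-- ===== VERDICT (by name: the statement is the Claim_ definition above) =====
theorem recent_real_errors_spec : Claim_equal_recent_real_errors := by
  intro lines _
  unfold Spec_recent_real_errors recent_real_errors recent_real_errors_alt
  rw [a_loop_eq, altGoB_eq lines.reverse [] (by simp)]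
  rw [PySem.List.slice_from_neg_ofNat (lines.filter errLineB) 6 (by omega)]
  simp [List.filter_reverse, List.take_reverse]
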